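-- pv_equiv track=rewrite | github.com/obtusa07/algorithm | 프로그래머스/unrated/132267. 콜라 문제/콜라 문제.py | solution
-- ===== SOURCE A (Python) =====
-- def solution(a, b, n):
--     answer = 0
--
--     while n >= a:
--         original_n = n
--         answer += (n // a) * b
--         n -= (n // a) * a
--         n += (original_n // a) * b
--     return answer
-- ===== SOURCE B (Python) =====
-- def solution(a, b, n):
--     if n < a:
--         return 0
--     return ((n - b) // (a - b)) * b
-- ===== Notes on version B (the rewrite author's own statement) =====
-- stated objective: simpler
-- what changed: Replaces A's trade-until-exhausted while loop with the loop-free closed form ((n-b)//(a-b))*b (0 when n<a): every trade nets a-b empties for b bottles, so the total follows from one division.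
-- outside the precondition, e.g. on solution(1, -6, 2): A returns -12, B returns -6; on solution(0, -1, 5): A raises ZeroDivisionError, B returns -6
import Mathlib
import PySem

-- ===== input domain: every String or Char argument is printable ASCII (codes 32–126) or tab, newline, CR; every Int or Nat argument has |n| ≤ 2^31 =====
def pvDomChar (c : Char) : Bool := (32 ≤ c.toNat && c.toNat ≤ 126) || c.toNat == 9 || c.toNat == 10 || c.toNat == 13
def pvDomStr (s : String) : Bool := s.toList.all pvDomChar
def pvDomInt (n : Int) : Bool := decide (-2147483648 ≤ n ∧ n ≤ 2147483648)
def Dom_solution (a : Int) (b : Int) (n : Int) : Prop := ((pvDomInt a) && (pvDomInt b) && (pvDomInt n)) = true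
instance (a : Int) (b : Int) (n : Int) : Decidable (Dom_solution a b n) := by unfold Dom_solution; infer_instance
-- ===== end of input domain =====

-- B replaces A's trade-until-exhausted while loop with the loop-free closed form ((n-b)//(a-b))*b (simpler).


-- ===== PORT A =====
-- while n >= a: answer += (n//a)*b; n -= (n//a)*a; n += (original_n//a)*b
-- (all three '//' divisions see the same quotient: n is only changed after it is read).
-- Fuel n.toNat + 1 suffices on Pre_: inside Pre_ each iteration strictly decreases n and keeps it ≥ 0.
def solutionLoop (a b : Int) : Nat → Int → Int → Int
  | 0, _, answer => answer
  | f + 1, n, answer =>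
    if a ≤ n then
      solutionLoop a b f
        (n - PySem.Int.floordiv n a * a + PySem.Int.floordiv n a * b)
        (answer + PySem.Int.floordiv n a * b)
    else answer

def solution (a : Int) (b : Int) (n : Int) : Int :=
  solutionLoop a b (n.toNat + 1) n 0

-- ===== PORT B =====
def solution_alt (a : Int) (b : Int) (n : Int) : Int :=
  if n < a then 0 else PySem.Int.floordiv (n - b) (a - b) * b

-- ===== PRECONDITION & SPEC =====
-- Pre_ restricts the entered loop to the cola problem's natural domain 0 ≤ b < a: with n ≥ a,
-- A divides by zero (a = 0), loops forever (a < 0 or b ≥ a), or, for b < 0, returns a repeated-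
-- negative-trade total outside the problem's intended domain; n < a (A returns 0) always stays inside.
def Pre_solution (a : Int) (b : Int) (n : Int) : Prop := n < a ∨ (0 ≤ b ∧ b < a)
instance (a : Int) (b : Int) (n : Int) : Decidable (Pre_solution a b n) := by unfold Pre_solution; infer_instance
def pvWitness_solution : Int × Int × Int := (2, 1, 20)
def Spec_solution (a : Int) (b : Int) (n : Int) (out : Int) : Prop := out = solution_alt a b n
instance (a : Int) (b : Int) (n : Int) (out : Int) : Decidable (Spec_solution a b n out) := by unfold Spec_solution; infer_instance

-- ===== CLAIM (what is proved, stated in full; the proofs are below) =====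
def Claim_equal_solution : Prop := ∀ (a : Int) (b : Int) (n : Int), Dom_solution a b n → Pre_solution a b n → Spec_solution a b n (solution a b n)

-- ===== LEMMAS AND PROOFS =====

-- With enough fuel and 0 ≤ b < a, the loop adds exactly the closed form to the accumulator.
lemma loop_closed (a b : Int) (hb : 0 ≤ b) (hba : b < a) :
    ∀ (f : Nat) (n ans : Int), n.toNat < f →
      solutionLoop a b f n ans = ans + solution_alt a b n := by
  intro f
  induction f with
  | zero => intro n ans h; omega
  | succ f ih =>
    intro n ans hf
    by_cases h : a ≤ n
    · have ha : 0 < a := by omega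
      have hd : 0 < a - b := by omega
      have hq : PySem.Int.floordiv n a = n / a := PySem.Int.floordiv_eq_ediv_of_pos ha
      set q := n / a with hqdef
      have hr0 : 0 ≤ n % a := Int.emod_nonneg n (by omega)
      have hr1 : n % a < a := Int.emod_lt_of_pos n ha
      have hnq : a * q + n % a = n := Int.ediv_add_emod n a
      have hq1 : 1 ≤ q := (Int.le_ediv_iff_mul_le ha).2 (by omega)
      have hqb : b ≤ q * b := le_mul_of_one_le_left hb hq1
      have hqab : a - b ≤ q * (a - b) := le_mul_of_one_le_left (by omega) hq1
      set n' := n - q * a + q * b with hn'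
      have hn'eq : n' = n % a + q * b := by rw [hn']; nlinarith [hnq]
      have hn'0 : 0 ≤ n' := by omega
      have hn'lt : n' < n := by nlinarith [hqab]
      have hstep : n'.toNat < f := by omega
      have halt : solution_alt a b n = q * b + solution_alt a b n' := by
        have hsplit : (n - b) / (a - b) = (n' - b) / (a - b) + q := by
          have hdec : n - b = (n' - b) + q * (a - b) := by rw [hn']; ring
          rw [hdec, Int.add_mul_ediv_right _ _ (by omega : a - b ≠ 0)]
        by_cases h2 : n' < a
        · have hz : (n' - b) / (a - b) = 0 :=
            Int.ediv_eq_zero_of_lt (by omega) (by omega)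
          simp only [solution_alt, if_neg (not_lt.2 h), if_pos h2,
            PySem.Int.floordiv_eq_ediv_of_pos hd, hsplit, hz]
          ring
        · simp only [solution_alt, if_neg (not_lt.2 h), if_neg h2,
            PySem.Int.floordiv_eq_ediv_of_pos hd, hsplit]
          ring
      calc solutionLoop a b (f + 1) n ans
          = solutionLoop a b f n' (ans + q * b) := by
            simp only [solutionLoop, if_pos h, hq, hn']
        _ = ans + q * b + solution_alt a b n' := ih n' (ans + q * b) hstep
        _ = ans + solution_alt a b n := by rw [halt]; ring
    · simp only [solutionLoop, if_neg h, solution_alt, if_pos (by omega : n < a)]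
      ring

-- ===== VERDICT (by name: the statement is the Claim_ definition above) =====
theorem solution_spec : Claim_equal_solution := by
  intro a b n _ hpre
  unfold Spec_solution solution
  by_cases hna : n < a
  · simp only [solutionLoop, if_neg (by omega : ¬ a ≤ n), solution_alt, if_pos hna]
  · rcases hpre with h | ⟨hb, hba⟩
    · omega
    · have := loop_closed a b hb hba (n.toNat + 1) n 0 (by omega)
      omega
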